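-- pv_equiv track=rewrite | github.com/CloudChef/atlasclaw | app/atlasclaw/auth/guards.py | _normalize_permission_path
-- ===== SOURCE A (Python) =====
-- SKILL_MODULE_PERMISSION_KEYS = {"view", "enable_disable", "manage_permissions"}
--
-- PROVIDER_MODULE_PERMISSION_KEYS = {"manage_permissions"}
--
-- CHANNEL_MODULE_PERMISSION_KEYS = {"manage_permissions"}
--
-- def _normalize_permission_path(permission_path: str) -> list[str]:
--     parts = [segment.strip() for segment in permission_path.split(".") if segment.strip()]
--     if len(parts) == 2 and parts[0] == "skills" and parts[1] in SKILL_MODULE_PERMISSION_KEYS: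
--         return ["skills", "module_permissions", parts[1]]
--     if len(parts) == 2 and parts[0] == "providers" and parts[1] in PROVIDER_MODULE_PERMISSION_KEYS:
--         return ["providers", "module_permissions", parts[1]]
--     if len(parts) == 2 and parts[0] == "channels" and parts[1] in CHANNEL_MODULE_PERMISSION_KEYS:
--         return ["channels", "module_permissions", parts[1]]
--     return parts
-- ===== SOURCE B (Python) =====
-- SKILL_MODULE_PERMISSION_KEYS = {"view", "enable_disable", "manage_permissions"}
--
-- PROVIDER_MODULE_PERMISSION_KEYS = {"manage_permissions"}
--
-- CHANNEL_MODULE_PERMISSION_KEYS = {"manage_permissions"}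
--
-- # Flat set of the canonical (module, key) pairs that get the "module_permissions"
-- # segment spliced in; derived from the three per-module key sets above.
-- _MODULE_PERMISSION_PAIRS = {
--     (module, key)
--     for module, keys in (
--         ("skills", SKILL_MODULE_PERMISSION_KEYS),
--         ("providers", PROVIDER_MODULE_PERMISSION_KEYS),
--         ("channels", CHANNEL_MODULE_PERMISSION_KEYS),
--     )
--     for key in keys
-- }
--
--
-- def _normalize_permission_path(permission_path: str) -> list[str]:
--     def walk(s: str) -> list[str]:
--         head, sep, tail = s.partition(".")
--         seg = head.strip()
--         rest = walk(tail) if sep else []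
--         return [seg, *rest] if seg else rest
--
--     parts = walk(permission_path)
--     if len(parts) == 2 and (parts[0], parts[1]) in _MODULE_PERMISSION_PAIRS:
--         return [parts[0], "module_permissions", parts[1]]
--     return parts
-- ===== Notes on version B (the rewrite author's own statement) =====
-- stated objective: alternative
-- what changed: B tokenizes the path by a recursive str.partition walk (strip head, recurse on the tail after the first dot) instead of A's split/strip/filter comprehension, and decides the module_permissions splice by one membership test against a flat set of canonical (module, key) pairs instead of A's three sequential per-module branches.
import Mathlib
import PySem

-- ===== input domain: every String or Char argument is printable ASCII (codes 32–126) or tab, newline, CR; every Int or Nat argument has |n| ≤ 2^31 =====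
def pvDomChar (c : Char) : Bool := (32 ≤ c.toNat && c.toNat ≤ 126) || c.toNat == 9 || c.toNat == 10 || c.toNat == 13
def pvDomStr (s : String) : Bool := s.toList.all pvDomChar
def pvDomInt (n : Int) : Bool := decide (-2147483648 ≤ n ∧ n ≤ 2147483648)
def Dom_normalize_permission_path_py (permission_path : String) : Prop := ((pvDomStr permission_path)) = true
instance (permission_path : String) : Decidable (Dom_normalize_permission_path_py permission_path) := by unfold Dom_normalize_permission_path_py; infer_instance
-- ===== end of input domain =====

-- B tokenizes by a recursive str.partition walk (instead of a split/strip/filter comprehension)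
-- and splices "module_permissions" after one membership test in a flat set of canonical
-- (module, key) pairs (instead of three sequential per-module branches); objective: alternative.

-- ===== PORT A =====
def SKILL_MODULE_PERMISSION_KEYS : List String := ["view", "enable_disable", "manage_permissions"]
def PROVIDER_MODULE_PERMISSION_KEYS : List String := ["manage_permissions"]
def CHANNEL_MODULE_PERMISSION_KEYS : List String := ["manage_permissions"]

def normalize_permission_path_py (permission_path : String) : List String :=
  -- parts = [segment.strip() for segment in permission_path.split(".") if segment.strip()]
  let parts : List String :=
    (((PySem.Chars.splitOn permission_path.toList ['.']).map String.ofList).filter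
        (fun segment => PySem.Str.strip segment ≠ "")).map
      (fun segment => PySem.Str.strip segment)
  if parts.length = 2 ∧ PySem.List.pyGetD parts 0 "" = "skills" ∧
      PySem.List.pyGetD parts 1 "" ∈ SKILL_MODULE_PERMISSION_KEYS then
    ["skills", "module_permissions", PySem.List.pyGetD parts 1 ""]
  else if parts.length = 2 ∧ PySem.List.pyGetD parts 0 "" = "providers" ∧
      PySem.List.pyGetD parts 1 "" ∈ PROVIDER_MODULE_PERMISSION_KEYS then
    ["providers", "module_permissions", PySem.List.pyGetD parts 1 ""]
  else if parts.length = 2 ∧ PySem.List.pyGetD parts 0 "" = "channels" ∧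
      PySem.List.pyGetD parts 1 "" ∈ CHANNEL_MODULE_PERMISSION_KEYS then
    ["channels", "module_permissions", PySem.List.pyGetD parts 1 ""]
  else parts

-- ===== PORT B =====
-- the set literal _MODULE_PERMISSION_PAIRS of Source B (in its comprehension order)
def MODULE_PERMISSION_PAIRS : List (String × String) :=
  [("skills", "view"), ("skills", "enable_disable"), ("skills", "manage_permissions"),
   ("providers", "manage_permissions"), ("channels", "manage_permissions")]

-- Source B's inner `walk`: head, sep, tail = s.partition("."); seg = head.strip();
-- rest = walk(tail) if sep else []; return [seg, *rest] if seg else rest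
def pvWalk (s : List Char) : List String :=
  let head := s.takeWhile (fun c => c ≠ '.')
  let seg := String.ofList (PySem.Chars.strip head)
  let rest := if '.' ∈ s then pvWalk (s.drop (head.length + 1)) else []
  if seg ≠ "" then seg :: rest else rest
termination_by s.length
decreasing_by
  have hs : s ≠ [] := List.ne_nil_of_mem (by assumption)
  have := List.length_pos_iff.mpr hs
  simp only [List.length_drop]
  omega

def normalize_permission_path_py_alt (permission_path : String) : List String :=
  let parts := pvWalk permission_path.toList
  match parts with
  | [a, b] =>
    if (a, b) ∈ MODULE_PERMISSION_PAIRS then [a, "module_permissions", b] else parts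
  | _ => parts

-- ===== PRECONDITION & SPEC =====
def Spec_normalize_permission_path_py (permission_path : String) (out : List String) : Prop := out = normalize_permission_path_py_alt permission_path
instance (permission_path : String) (out : List String) : Decidable (Spec_normalize_permission_path_py permission_path out) := by unfold Spec_normalize_permission_path_py; infer_instance

-- ===== CLAIM (what is proved, stated in full; the proofs are below) =====
def Claim_equal_normalize_permission_path_py : Prop := ∀ (permission_path : String), Dom_normalize_permission_path_py permission_path → Spec_normalize_permission_path_py permission_path (normalize_permission_path_py permission_path)

-- ===== LEMMAS AND PROOFS =====

-- proof-only recursive characterisation of splitOn on the separator ['.']: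
-- the raw (unstripped) segments, in pvWalk's recursion shape
def pvSegs (s : List Char) : List (List Char) :=
  let head := s.takeWhile (fun c => c ≠ '.')
  head :: (if '.' ∈ s then pvSegs (s.drop (head.length + 1)) else [])
termination_by s.length
decreasing_by
  have hs : s ≠ [] := List.ne_nil_of_mem (by assumption)
  have := List.length_pos_iff.mpr hs
  simp only [List.length_drop]
  omega

-- prepend `pre` to the first block (go's `cur` accumulator flushed into the result)
def pvPre (pre : List Char) : List (List Char) → List (List Char)
  | [] => [pre]
  | x :: xs => (pre ++ x) :: xs

lemma pvSegs_ne_nil (s : List Char) : pvSegs s ≠ [] := by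
  rw [pvSegs]; simp

lemma pvPre_nil (s : List Char) : pvPre [] (pvSegs s) = pvSegs s := by
  rcases h : pvSegs s with _ | ⟨x, xs⟩
  · exact absurd h (pvSegs_ne_nil s)
  · simp [pvPre]

lemma pvPre_comp (a b : List Char) (L : List (List Char)) :
    pvPre a (pvPre b L) = pvPre (a ++ b) L := by
  cases L <;> simp [pvPre]

lemma pvSegs_cons_dot (rest : List Char) :
    pvSegs ('.' :: rest) = [] :: pvSegs rest := by
  conv_lhs => rw [pvSegs]
  simp

lemma pvSegs_cons_ne (c : Char) (rest : List Char) (hc : c ≠ '.') :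
    pvSegs (c :: rest) = pvPre [c] (pvSegs rest) := by
  have hc' : ¬('.' = c) := fun h => hc h.symm
  conv_lhs => rw [pvSegs]
  conv_rhs => rw [pvSegs]
  simp [hc, pvPre, List.mem_cons, hc']

lemma go_spec (fuel : Nat) (l cur : List Char) (acc : List (List Char))
    (h : l.length < fuel) :
    PySem.Chars.splitOn.go ['.'] fuel l cur acc
      = acc.reverse ++ pvPre cur.reverse (pvSegs l) := by
  induction fuel generalizing l cur acc with
  | zero => omega
  | succ fuel ih =>
    match l with
    | [] =>
      rw [pvSegs]
      simp [PySem.Chars.splitOn.go, pvPre]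
    | c :: rest =>
      rw [PySem.Chars.splitOn.go.eq_def]
      by_cases hc : c = '.'
      · subst hc
        have hp : List.isPrefixOf ['.'] ('.' :: rest) = true := by
          simp [List.isPrefixOf]
        simp only [hp, if_true]
        have hdrop : List.drop ['.'].length ('.' :: rest) = rest := rfl
        rw [hdrop, ih rest [] (cur.reverse :: acc)
            (by simpa using Nat.lt_of_succ_lt_succ h)]
        rw [pvSegs_cons_dot]
        rcases hseg : pvSegs rest with _ | ⟨x, xs⟩
        · exact absurd hseg (pvSegs_ne_nil rest)
        · simp [pvPre]
      · have hp : List.isPrefixOf ['.'] (c :: rest) = false := by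
          simp only [List.isPrefixOf, Bool.and_eq_false_iff, beq_eq_false_iff_ne]
          left
          exact fun h' => absurd h'.symm hc
        simp only [hp, Bool.false_eq_true, if_false]
        rw [ih rest (c :: cur) acc (by simpa using Nat.lt_of_succ_lt_succ h)]
        rw [pvSegs_cons_ne c rest hc, pvPre_comp]
        simp

lemma splitOn_eq_pvSegs (l : List Char) :
    PySem.Chars.splitOn l ['.'] = pvSegs l := by
  unfold PySem.Chars.splitOn
  rw [go_spec _ _ _ _ (Nat.lt_succ_self _)]
  simp [pvPre_nil]

-- pvWalk is the strip-and-drop-empties pass over the raw segments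
lemma pvWalk_eq (n : Nat) (l : List Char) (hn : l.length ≤ n) :
    pvWalk l
      = ((pvSegs l).map (fun cs => String.ofList (PySem.Chars.strip cs))).filter
          (fun s => s ≠ "") := by
  induction n generalizing l with
  | zero =>
    have : l = [] := List.length_eq_zero_iff.mp (Nat.le_zero.mp hn)
    subst this
    rw [pvWalk, pvSegs]
    simp only [List.not_mem_nil, if_false, List.map_cons, List.map_nil,
      List.filter_cons, List.filter_nil]
    split_ifs <;> simp_all
  | succ n ih =>
    rw [pvWalk, pvSegs]
    by_cases hd : '.' ∈ l
    · have hlen : (l.drop ((l.takeWhile (fun c => c ≠ '.')).length + 1)).length ≤ n := by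
        have hpos := List.length_pos_iff.mpr (List.ne_nil_of_mem hd)
        simp only [List.length_drop]
        omega
      simp only [hd, if_true, ih _ hlen, List.map_cons, List.filter_cons]
      split_ifs <;> simp_all
    · simp only [hd, if_false, List.map_cons, List.map_nil, List.filter_cons,
        List.filter_nil]
      split_ifs <;> simp_all

-- A's `parts` equals B's `parts`
lemma parts_eq (l : List Char) :
    (((PySem.Chars.splitOn l ['.']).map String.ofList).filter
        (fun segment => PySem.Str.strip segment ≠ "")).map
      (fun segment => PySem.Str.strip segment)
      = pvWalk l := by
  have key : ∀ cs : List Char,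
      PySem.Str.strip (String.ofList cs) = String.ofList (PySem.Chars.strip cs) := by
    intro cs; simp [PySem.Str.strip]
  rw [pvWalk_eq l.length l le_rfl, splitOn_eq_pvSegs, List.filter_map, List.map_map]
  rw [show ((pvSegs l).map fun cs => String.ofList (PySem.Chars.strip cs)).filter
        (fun s => s ≠ "")
      = ((pvSegs l).filter
          ((fun s => decide (s ≠ "")) ∘ fun cs => String.ofList (PySem.Chars.strip cs))).map
          (fun cs => String.ofList (PySem.Chars.strip cs)) from List.filter_map]
  congr 1
  · funext cs; simp [Function.comp, key]
  · congr 1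
    funext cs; simp [Function.comp, key]

-- given the same `parts`, A's branch cascade and B's flat pair-set test agree
lemma branches_eq (parts : List String) :
    (if parts.length = 2 ∧ PySem.List.pyGetD parts 0 "" = "skills" ∧
        PySem.List.pyGetD parts 1 "" ∈ SKILL_MODULE_PERMISSION_KEYS then
      ["skills", "module_permissions", PySem.List.pyGetD parts 1 ""]
    else if parts.length = 2 ∧ PySem.List.pyGetD parts 0 "" = "providers" ∧
        PySem.List.pyGetD parts 1 "" ∈ PROVIDER_MODULE_PERMISSION_KEYS then
      ["providers", "module_permissions", PySem.List.pyGetD parts 1 ""]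
    else if parts.length = 2 ∧ PySem.List.pyGetD parts 0 "" = "channels" ∧
        PySem.List.pyGetD parts 1 "" ∈ CHANNEL_MODULE_PERMISSION_KEYS then
      ["channels", "module_permissions", PySem.List.pyGetD parts 1 ""]
    else parts)
    = (match parts with
      | [a, b] =>
        if (a, b) ∈ MODULE_PERMISSION_PAIRS then [a, "module_permissions", b] else parts
      | _ => parts) := by
  match parts with
  | [] => rfl
  | [a] => rfl
  | a :: b :: c :: rest => simp [PySem.List.pyGetD]
  | [a, b] =>
    simp only [PySem.List.pyGetD, MODULE_PERMISSION_PAIRS, SKILL_MODULE_PERMISSION_KEYS,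
      PROVIDER_MODULE_PERMISSION_KEYS, CHANNEL_MODULE_PERMISSION_KEYS,
      List.mem_cons, List.not_mem_nil, Prod.mk.injEq]
    split_ifs <;> simp_all <;> try tauto

-- ===== VERDICT (by name: the statement is the Claim_ definition above) =====
theorem normalize_permission_path_py_spec : Claim_equal_normalize_permission_path_py := by
  intro p _
  unfold Spec_normalize_permission_path_py normalize_permission_path_py normalize_permission_path_py_alt
  rw [parts_eq]
  exact branches_eq _
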